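-- pv_equiv track=rewrite | github.com/do0ori/Algorithm-Study | 현대오토에버/2026 상반기/2번/적을_k명_처치하기_위한_최소_초기_체력.py | solution
-- ===== SOURCE A (Python) =====
-- def solution(powers):
--     """
--     정확히 1명, 2명, ..., n명의 적을 처치하기 위한 최소 초기 체력을 배열로 반환
--
--     Parameters:
--         powers (list[int]): 적 power 배열
--
--     Returns:
--         list[int]: answer[k - 1] = 정확히 k명을 처치하기 위한 최소 초기 체력
--     """
--
--     positives = sorted(x for x in powers if x > 0)
--     negatives = sorted((x for x in powers if x < 0), reverse=True)  # -1, -2, -5, ...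
--
--     p_cnt = len(positives)
--     n_cnt = len(negatives)
--     total = len(powers)
--
--     # prefix sum of positives
--     pos_sum = [0] * (p_cnt + 1)
--     for i in range(1, p_cnt + 1):
--         pos_sum[i] = pos_sum[i - 1] + positives[i - 1]
--
--     # prefix sum of negatives (negative values)
--     neg_sum = [0] * (n_cnt + 1)
--     for i in range(1, n_cnt + 1):
--         neg_sum[i] = neg_sum[i - 1] + negatives[i - 1]
--
--     # need_pos[x]: 앞의 x개 양수 적을 모두 잡기 위한 최소 초기 체력
--     # 양수 적 p를 잡으려면 현재 체력 > p 이므로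
--     # H + prefix_before >= p + 1
--     need_pos = [1] * (p_cnt + 1)
--     for i in range(1, p_cnt + 1):
--         need_here = positives[i - 1] + 1 - pos_sum[i - 1]
--         need_pos[i] = max(need_pos[i - 1], need_here, 1)
--
--     # need_neg[y]: 앞의 y개 음수 적을 모두 잡기 위해
--     # "음수 구간 시작 직전" 필요한 최소 체력
--     # negative = -a 를 잡으려면 현재 체력이 a보다 커야 하고,
--     # 잡고 나서도 1 이상이어야 하므로 결국 현재 체력 >= a + 1 이 필요.
--     need_neg = [1] * (n_cnt + 1)
--     for i in range(1, n_cnt + 1):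
--         # current_before = S + neg_sum[i - 1]
--         # need current_before >= abs(negatives[i - 1]) + 1
--         need_here = -negatives[i - 1] - neg_sum[i - 1] + 1
--         need_neg[i] = max(need_neg[i - 1], need_here, 1)
--
--     def cost(k, x):
--         """
--         정확히 k명을 잡을 때,
--         양수 x명 + 음수 (k-x)명을 선택했을 때 필요한 최소 초기 체력
--         """
--         y = k - x
--         return max(1, need_pos[x], need_neg[y] - pos_sum[x])
--
--     answer = [0] * total
--
--     for k in range(1, total + 1):
--         lo = max(0, k - n_cnt)
--         hi = min(k, p_cnt)
--
--         # A(x)=need_pos[x] 는 증가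
--         # B(x)=need_neg[k-x] - pos_sum[x] 는 감소
--         # max(A, B)의 최소는 교차 지점 근처에서 발생
--         l, r = lo, hi
--         while l < r:
--             mid = (l + r) // 2
--             if need_pos[mid] >= need_neg[k - mid] - pos_sum[mid]:
--                 r = mid
--             else:
--                 l = mid + 1
--
--         best = cost(k, l)
--         if l > lo:
--             prev_cost = cost(k, l - 1)
--             if prev_cost < best:
--                 best = prev_cost
--
--         answer[k - 1] = best
--
--     return answer
-- ===== SOURCE B (Python) =====
-- def _prefix(vals):
--     """out[i] = sum of the first i values."""
--     out = [0]
--     for v in vals: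
--         out.append(out[-1] + v)
--     return out
--
--
-- def _need(vals, f):
--     """out[i] = running max (floored at 1) of f(vals[j]) - prefix_sum[j] over j < i."""
--     out = [1]
--     cur, s = 1, 0
--     for v in vals:
--         cur = max(cur, f(v) - s)
--         s += v
--         out.append(cur)
--     return out
--
--
-- def solution(powers):
--     """answer[k-1] = min initial health to kill exactly k enemies.
--     One-pass sign partition, scan-built prefix/need tables via shared helpers,
--     and a running-minimum linear sweep over candidate positive-counts instead
--     of A's per-k binary search."""
--     pos_raw, neg_raw = [], []
--     for x in powers:
--         if x > 0:
--             pos_raw.append(x)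
--         elif x < 0:
--             neg_raw.append(x)
--     pos = sorted(pos_raw)
--     neg = sorted(neg_raw, reverse=True)
--     p_cnt, n_cnt = len(pos), len(neg)
--
--     ps = _prefix(pos)
--     np_ = _need(pos, lambda v: v + 1)
--     nn_ = _need(neg, lambda v: 1 - v)
--
--     answer = []
--     for k in range(1, len(powers) + 1):
--         lo = max(0, k - n_cnt)
--         hi = min(k, p_cnt)
--         best = max(1, np_[lo], nn_[k - lo] - ps[lo])
--         for x in range(lo + 1, hi + 1):
--             c = max(1, np_[x], nn_[k - x] - ps[x])
--             if c < best:
--                 best = c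
--         answer.append(best)
--     return answer
-- ===== Notes on version B (the rewrite author's own statement) =====
-- stated objective: simpler
-- what changed: Sign split becomes one explicit partition pass, the four index-driven prefix/need arrays collapse into two shared append-scan helpers (_prefix and _need with a term lambda), and the per-k binary search plus previous-candidate fix-up is replaced by a running-minimum linear sweep over all candidate positive-counts.
import Mathlib
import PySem

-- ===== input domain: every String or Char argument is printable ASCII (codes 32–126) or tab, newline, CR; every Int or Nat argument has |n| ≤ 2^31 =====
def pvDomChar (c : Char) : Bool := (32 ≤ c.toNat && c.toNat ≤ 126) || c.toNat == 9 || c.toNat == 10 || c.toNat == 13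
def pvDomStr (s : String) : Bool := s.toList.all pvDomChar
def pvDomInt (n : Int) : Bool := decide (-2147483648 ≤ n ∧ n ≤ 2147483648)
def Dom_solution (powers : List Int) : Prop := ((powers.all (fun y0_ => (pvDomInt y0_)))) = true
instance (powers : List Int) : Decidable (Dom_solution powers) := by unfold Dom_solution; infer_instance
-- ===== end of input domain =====

-- B replaces the index-driven table fills and the per-k binary search by shared scan helpers
-- and a running-minimum linear sweep (simpler, same results).

-- ===== PORT A =====
-- A's arrays are ported as memoised index recurrences (array[i] = function at i);
-- list indexing uses getD, exact since A only indexes in range on inputs admitted by Pre_.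
def pvPositives (powers : List Int) : List Int :=
  PySem.List.sorted (powers.filter (fun x => decide (0 < x))) (fun x => x) false

def pvNegatives (powers : List Int) : List Int :=
  PySem.List.sorted (powers.filter (fun x => decide (x < 0))) (fun x => x) true

def pvPosSum (poss : List Int) : Nat → Int
  | 0 => 0
  | i + 1 => pvPosSum poss i + poss.getD i 0

def pvNegSum (negs : List Int) : Nat → Int
  | 0 => 0
  | i + 1 => pvNegSum negs i + negs.getD i 0

def pvNeedPos (poss : List Int) : Nat → Int
  | 0 => 1
  | i + 1 => max (max (pvNeedPos poss i) (poss.getD i 0 + 1 - pvPosSum poss i)) 1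

def pvNeedNeg (negs : List Int) : Nat → Int
  | 0 => 1
  | i + 1 => max (max (pvNeedNeg negs i) (-(negs.getD i 0) - pvNegSum negs i + 1)) 1

def pvCost (poss negs : List Int) (k x : Nat) : Int :=
  max 1 (max (pvNeedPos poss x) (pvNeedNeg negs (k - x) - pvPosSum poss x))

-- A's binary search on [l, r): first x with need_pos[x] >= need_neg[k-x] - pos_sum[x]
def pvBSearch (f g : Nat → Int) (l r : Nat) : Nat :=
  if l < r then
    let mid := (l + r) / 2
    if g mid ≤ f mid then pvBSearch f g l mid else pvBSearch f g (mid + 1) r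
  else l
termination_by r - l
decreasing_by all_goals omega

def solution (powers : List Int) : List Int :=
  let poss := pvPositives powers
  let negs := pvNegatives powers
  (List.range' 1 powers.length).map (fun k =>
    let lo := k - negs.length            -- max(0, k - n_cnt) as Nat subtraction
    let hi := min k poss.length
    let l := pvBSearch (pvNeedPos poss)
      (fun x => pvNeedNeg negs (k - x) - pvPosSum poss x) lo hi
    let best := pvCost poss negs k l
    if lo < l then
      let prev := pvCost poss negs k (l - 1)
      if prev < best then prev else best
    else best)

-- ===== PORT B =====
-- one-pass sign partition (Source B's for-loop with two appends)
def altSplit (powers : List Int) : List Int × List Int :=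
  powers.foldl
    (fun st x =>
      if 0 < x then (st.1 ++ [x], st.2)
      else if x < 0 then (st.1, st.2 ++ [x])
      else st)
    ([], [])

-- _prefix: out=[0]; for v: out.append(out[-1]+v)  (the carried s is out[-1])
def altPrefix : List Int → Int → List Int
  | [], s => [s]
  | v :: t, s => s :: altPrefix t (s + v)

-- _need: out=[1]; cur=1; s=0; for v: cur=max(cur, f(v)-s); s+=v; out.append(cur)
def altNeed (g : Int → Int) : List Int → Int → Int → List Int
  | [], cur, _ => [cur]
  | v :: t, cur, s => cur :: altNeed g t (max cur (g v - s)) (s + v)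

def solution_alt (powers : List Int) : List Int :=
  let raw := altSplit powers
  let pos := PySem.List.sorted raw.1 (fun x => x) false
  let neg := PySem.List.sorted raw.2 (fun x => x) true
  let ps := altPrefix pos 0
  let np := altNeed (fun v => v + 1) pos 1 0
  let nn := altNeed (fun v => 1 - v) neg 1 0
  (List.range' 1 powers.length).map (fun k =>
    let lo := k - neg.length
    let hi := min k pos.length
    (List.range' (lo + 1) (hi - lo)).foldl
      (fun best x =>
        let c := max 1 (max (np.getD x 0) (nn.getD (k - x) 0 - ps.getD x 0))
        if c < best then c else best)
      (max 1 (max (np.getD lo 0) (nn.getD (k - lo) 0 - ps.getD lo 0))))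

-- ===== PRECONDITION & SPEC =====
-- Pre_ excludes lists containing 0: there total > p_cnt + n_cnt, so for k = total the candidate
-- range is empty and BOTH programs raise IndexError (need arrays indexed past their length).
def Pre_solution (powers : List Int) : Prop := (0 : Int) ∉ powers
instance (powers : List Int) : Decidable (Pre_solution powers) := by unfold Pre_solution; infer_instance

def pvWitness_solution : List Int := [3, -2, 1, -4]

def Spec_solution (powers : List Int) (out : List Int) : Prop := out = solution_alt powers
instance (powers : List Int) (out : List Int) : Decidable (Spec_solution powers out) := by unfold Spec_solution; infer_instance

-- ===== CLAIM (what is proved, stated in full; the proofs are below) =====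
def Claim_equal_solution : Prop := ∀ (powers : List Int), Dom_solution powers → Pre_solution powers → Spec_solution powers (solution powers)

-- ===== LEMMAS AND PROOFS =====

-- the partition pass produces exactly the two filters A sorts
theorem altSplit_go (l : List Int) (a b : List Int) :
    l.foldl
      (fun st x =>
        if 0 < x then (st.1 ++ [x], st.2)
        else if x < 0 then (st.1, st.2 ++ [x])
        else st)
      (a, b)
    = (a ++ l.filter (fun x => decide (0 < x)), b ++ l.filter (fun x => decide (x < 0))) := by
  induction l generalizing a b with
  | nil => simp
  | cons v t ih =>
    by_cases h1 : 0 < v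
    · simp [List.foldl, h1, not_lt.mpr (le_of_lt h1), ih]
    · by_cases h2 : v < 0
      · simp [List.foldl, h1, h2, ih]
      · simp [List.foldl, h1, h2, ih]

theorem altSplit_eq (powers : List Int) :
    altSplit powers = (powers.filter (fun x => decide (0 < x)), powers.filter (fun x => decide (x < 0))) := by
  unfold altSplit; simpa using altSplit_go powers [] []

theorem posSum_cons (v : Int) (t : List Int) (i : Nat) :
    pvPosSum (v :: t) (i + 1) = v + pvPosSum t i := by
  induction i with
  | zero => simp [pvPosSum]
  | succ j ih =>
    have h1 : pvPosSum (v :: t) (j + 1 + 1) = pvPosSum (v :: t) (j + 1) + (v :: t).getD (j + 1) 0 := rfl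
    have h2 : pvPosSum t (j + 1) = pvPosSum t j + t.getD j 0 := rfl
    rw [h1, h2, ih, List.getD_cons_succ]
    ring

theorem negSum_eq_posSum (l : List Int) (i : Nat) : pvNegSum l i = pvPosSum l i := by
  induction i with
  | zero => rfl
  | succ j ih => simp [pvNegSum, pvPosSum, ih]

theorem altPrefix_getD (l : List Int) (s : Int) (i : Nat) (h : i ≤ l.length) :
    (altPrefix l s).getD i 0 = s + pvPosSum l i := by
  induction l generalizing s i with
  | nil =>
    have hi0 : i = 0 := by simpa using h
    subst hi0
    simp [altPrefix, pvPosSum]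
  | cons v t ih =>
    cases i with
    | zero => simp [altPrefix, pvPosSum]
    | succ j =>
      have hj : j ≤ t.length := by simpa using h
      simp only [altPrefix, List.getD_cons_succ, posSum_cons]
      rw [ih (s + v) j hj]; ring

-- the generic "running need" recurrence that both of Source B's _need scans compute
def pvGNeed (g : Int → Int) (l : List Int) (cur s : Int) : Nat → Int
  | 0 => cur
  | i + 1 => max (pvGNeed g l cur s i) (g (l.getD i 0) - s - pvPosSum l i)

theorem gNeed_shift (g : Int → Int) (v : Int) (t : List Int) (cur s : Int) (j : Nat) :
    pvGNeed g (v :: t) cur s (j + 1) = pvGNeed g t (max cur (g v - s)) (s + v) j := by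
  induction j with
  | zero => simp [pvGNeed, pvPosSum]
  | succ i ih =>
    simp only [pvGNeed, List.getD_cons_succ, posSum_cons]
    congr 1
    ring

theorem altNeed_getD (g : Int → Int) (l : List Int) (cur s : Int) (i : Nat) (h : i ≤ l.length) :
    (altNeed g l cur s).getD i 0 = pvGNeed g l cur s i := by
  induction l generalizing cur s i with
  | nil =>
    have hi0 : i = 0 := by simpa using h
    subst hi0
    simp [altNeed, pvGNeed]
  | cons v t ih =>
    cases i with
    | zero => simp [altNeed, pvGNeed]
    | succ j =>
      have hj : j ≤ t.length := by simpa using h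
      simp only [altNeed, List.getD_cons_succ, gNeed_shift]
      exact ih (max cur (g v - s)) (s + v) j hj

theorem needPos_ge_one (l : List Int) (i : Nat) : 1 ≤ pvNeedPos l i := by
  cases i with
  | zero => simp [pvNeedPos]
  | succ j => simp [pvNeedPos]

theorem needNeg_ge_one (l : List Int) (i : Nat) : 1 ≤ pvNeedNeg l i := by
  cases i with
  | zero => simp [pvNeedNeg]
  | succ j => simp [pvNeedNeg]

theorem needPos_eq_gNeed (l : List Int) (i : Nat) :
    pvNeedPos l i = pvGNeed (fun v => v + 1) l 1 0 i := by
  induction i with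
  | zero => rfl
  | succ j ih =>
    have h1 := needPos_ge_one l j
    simp only [pvNeedPos, pvGNeed, ih]
    rw [← ih]
    omega

theorem needNeg_eq_gNeed (l : List Int) (i : Nat) :
    pvNeedNeg l i = pvGNeed (fun v => 1 - v) l 1 0 i := by
  induction i with
  | zero => rfl
  | succ j ih =>
    have h1 := needNeg_ge_one l j
    simp only [pvNeedNeg, pvGNeed, ih, negSum_eq_posSum]
    rw [← ih]
    omega

theorem foldl_min_le (vs : List Int) (v : Int) : vs.foldl min v ≤ v ∧ ∀ w ∈ vs, vs.foldl min v ≤ w := by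
  induction vs generalizing v with
  | nil => simp
  | cons a t ih =>
    have h := ih (min v a)
    refine ⟨le_trans h.1 (min_le_left _ _), ?_⟩
    intro w hw
    rcases List.mem_cons.mp hw with rfl | hw
    · exact le_trans h.1 (min_le_right _ _)
    · exact h.2 w hw

theorem foldl_min_mem (vs : List Int) (v : Int) : vs.foldl min v = v ∨ vs.foldl min v ∈ vs := by
  induction vs generalizing v with
  | nil => simp
  | cons a t ih =>
    rcases ih (min v a) with h | h
    · rcases le_total v a with hva | hva
      · left; simpa [List.foldl, min_eq_left hva] using h
      · right; simp [List.foldl] at h ⊢; left; rw [h, min_eq_right hva]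
    · right; exact List.mem_cons_of_mem _ h

theorem foldl_min_eq (vs : List Int) (v b : Int)
    (hmem : b = v ∨ b ∈ vs) (hv : b ≤ v) (hall : ∀ w ∈ vs, b ≤ w) :
    vs.foldl min v = b := by
  have hle := foldl_min_le vs v
  apply le_antisymm
  · rcases hmem with rfl | h
    · exact hle.1
    · exact hle.2 b h
  · rcases foldl_min_mem vs v with h | h
    · rw [h]; exact hv
    · exact hall _ h

theorem pvBSearch_spec (f g : Nat → Int) (hf : Monotone f) (hg : Antitone g)
    (l r : Nat) (h : l ≤ r) :
    l ≤ pvBSearch f g l r ∧ pvBSearch f g l r ≤ r ∧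
    (∀ x, l ≤ x → x < pvBSearch f g l r → f x < g x) ∧
    (pvBSearch f g l r = r ∨ g (pvBSearch f g l r) ≤ f (pvBSearch f g l r)) := by
  by_cases hlr : l < r
  · rw [pvBSearch]
    simp only [hlr, if_true]
    set mid := (l + r) / 2 with hmid
    have hm1 : l ≤ mid := by omega
    have hm2 : mid < r := by omega
    by_cases hc : g mid ≤ f mid
    · simp only [hc, if_true]
      have ih := pvBSearch_spec f g hf hg l mid hm1
      exact ⟨ih.1, by omega, ih.2.2.1, by
        rcases ih.2.2.2 with he | hge
        · right; rw [he]; exact hc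
        · right; exact hge⟩
    · simp only [hc, if_false]
      have ih := pvBSearch_spec f g hf hg (mid + 1) r (by omega)
      refine ⟨by omega, ih.2.1, ?_, ih.2.2.2⟩
      intro x hx hxlt
      by_cases hxm : mid + 1 ≤ x
      · exact ih.2.2.1 x hxm hxlt
      · have hxle : x ≤ mid := by omega
        have h1 : f x ≤ f mid := hf hxle
        have h2 : g mid ≤ g x := hg hxle
        omega
  · rw [pvBSearch]
    simp only [hlr, if_false]
    have : l = r := by omega
    exact ⟨le_refl _, h, by omega, Or.inl this⟩
termination_by r - l
decreasing_by all_goals omega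

theorem needPos_mono (poss : List Int) : Monotone (pvNeedPos poss) := by
  apply monotone_nat_of_le_succ
  intro n
  simp [pvNeedPos]

theorem needNeg_mono (negs : List Int) : Monotone (pvNeedNeg negs) := by
  apply monotone_nat_of_le_succ
  intro n
  simp [pvNeedNeg]

theorem posSum_mono (poss : List Int) (hpos : ∀ y ∈ poss, 0 < y) : Monotone (pvPosSum poss) := by
  apply monotone_nat_of_le_succ
  intro n
  show pvPosSum poss n ≤ pvPosSum poss n + poss.getD n 0
  have : 0 ≤ poss.getD n 0 := by
    by_cases hn : n < poss.length
    · have := hpos (poss.getD n 0) (by rw [List.getD_eq_getElem _ _ hn]; exact List.getElem_mem hn)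
      omega
    · rw [List.getD_eq_default _ _ (by omega)]
  omega

theorem positives_pos (powers : List Int) : ∀ y ∈ pvPositives powers, 0 < y := by
  intro y hy
  unfold pvPositives at hy
  rw [PySem.List.mem_sorted] at hy
  have := List.of_mem_filter hy
  simpa using this

-- the antitone combination g(x) = need_neg[k-x] - pos_sum[x]
theorem g_antitone (poss negs : List Int) (hpos : ∀ y ∈ poss, 0 < y) (k : Nat) :
    Antitone (fun x => pvNeedNeg negs (k - x) - pvPosSum poss x) := by
  intro x y hxy
  have h1 : pvNeedNeg negs (k - y) ≤ pvNeedNeg negs (k - x) := needNeg_mono negs (by omega)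
  have h2 : pvPosSum poss x ≤ pvPosSum poss y := posSum_mono poss hpos hxy
  simp only
  omega

-- without zeros every element is counted once by the two filters
theorem length_split (powers : List Int) (h : (0 : Int) ∉ powers) :
    powers.length = (pvPositives powers).length + (pvNegatives powers).length := by
  unfold pvPositives pvNegatives
  rw [PySem.List.length_sorted, PySem.List.length_sorted]
  induction powers with
  | nil => simp
  | cons a t ih =>
    have ha : a ≠ 0 := fun hh => h (hh ▸ List.mem_cons_self)
    have ht := ih (fun hh => h (List.mem_cons_of_mem _ hh))
    rcases lt_trichotomy a 0 with hlt | hz | hgt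
    · simp [hlt, not_lt.mpr (le_of_lt hlt), ht]; omega
    · exact absurd hz ha
    · simp [hgt, not_lt.mpr (le_of_lt hgt), ht]; omega

-- the per-k equality: A's binary-search candidate equals the exhaustive running minimum
theorem perk_eq (poss negs : List Int) (hpos : ∀ y ∈ poss, 0 < y) (k lo hi : Nat)
    (hlohi : lo ≤ hi) :
    (((List.range' (lo + 1) (hi - lo)).map (pvCost poss negs k)).foldl min (pvCost poss negs k lo)) =
    (let l := pvBSearch (pvNeedPos poss)
        (fun x => pvNeedNeg negs (k - x) - pvPosSum poss x) lo hi
      let best := pvCost poss negs k l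
      if lo < l then
        let prev := pvCost poss negs k (l - 1)
        if prev < best then prev else best
      else best) := by
  set f := pvNeedPos poss with hf_def
  set g := fun x => pvNeedNeg negs (k - x) - pvPosSum poss x with hg_def
  have hf : Monotone f := needPos_mono poss
  have hg : Antitone g := g_antitone poss negs hpos k
  obtain ⟨hl1, hl2, hbelow, hat⟩ := pvBSearch_spec f g hf hg lo hi hlohi
  set l := pvBSearch f g lo hi with hl_def
  have hcost : ∀ x, pvCost poss negs k x = max 1 (max (f x) (g x)) := fun x => rfl
  set best := (if lo < l then
      (if pvCost poss negs k (l - 1) < pvCost poss negs k l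
        then pvCost poss negs k (l - 1) else pvCost poss negs k l)
      else pvCost poss negs k l) with hbest_def
  have hlb : ∀ x, lo ≤ x → x ≤ hi → best ≤ pvCost poss negs k x := by
    intro x hxlo hxhi
    by_cases hxl : x < l
    · have hlo_lt : lo < l := by omega
      have hfg_x : f x < g x := hbelow x hxlo hxl
      have hfg_l1 : f (l - 1) < g (l - 1) := hbelow (l - 1) (by omega) (by omega)
      have hgmono : g (l - 1) ≤ g x := hg (by omega)
      have hcx : pvCost poss negs k x = max 1 (g x) := by
        rw [hcost]; omega
      have hcl1 : pvCost poss negs k (l - 1) = max 1 (g (l - 1)) := by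
        rw [hcost]; omega
      have hble : best ≤ pvCost poss negs k (l - 1) := by
        rw [hbest_def]; simp only [hlo_lt, if_true]; split_ifs <;> omega
      rw [hcx]; rw [hcl1] at hble; omega
    · have hxge : l ≤ x := by omega
      have hble : best ≤ pvCost poss negs k l := by
        rw [hbest_def]; split_ifs <;> omega
      rcases hat with hle | hgf
      · have : x = l := by omega
        rw [this]; exact hble
      · have hfm : f l ≤ f x := hf hxge
        have hcl : pvCost poss negs k l = max 1 (f l) := by rw [hcost]; omega
        have hcx := hcost x
        rw [hcl] at hble
        omega
  have hatt : ∃ x, lo ≤ x ∧ x ≤ hi ∧ best = pvCost poss negs k x := by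
    by_cases hlo_lt : lo < l
    · by_cases hc : pvCost poss negs k (l - 1) < pvCost poss negs k l
      · exact ⟨l - 1, by omega, by omega, by rw [hbest_def]; simp [hlo_lt, hc]⟩
      · exact ⟨l, by omega, hl2, by rw [hbest_def]; simp [hlo_lt, hc]⟩
    · exact ⟨l, by omega, hl2, by rw [hbest_def]; simp [hlo_lt]⟩
  obtain ⟨x0, hx0lo, hx0hi, hx0⟩ := hatt
  apply foldl_min_eq
  · rcases Nat.eq_or_lt_of_le hx0lo with heq | hlt
    · left; rw [hx0, heq]
    · right
      rw [hx0]
      exact List.mem_map_of_mem (List.mem_range'_1.mpr ⟨by omega, by omega⟩)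
  · exact hlb lo le_rfl (by omega)
  · intro w hw
    rw [List.mem_map] at hw
    obtain ⟨x, hx, rfl⟩ := hw
    rw [List.mem_range'_1] at hx
    exact hlb x (by omega) (by omega)

-- ===== VERDICT (by name: the statement is the Claim_ definition above) =====
theorem solution_spec : Claim_equal_solution := by
  intro powers _ hpre
  unfold Spec_solution solution solution_alt
  rw [altSplit_eq]
  simp only
  apply List.map_congr_left
  intro k hk
  rw [List.mem_range'] at hk
  have hsplit := length_split powers hpre
  have hpos := positives_pos powers
  set poss := pvPositives powers with hposs
  set negs := pvNegatives powers with hnegs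
  have hposs' : PySem.List.sorted (powers.filter (fun x => decide (0 < x))) (fun x => x) false = poss := rfl
  have hnegs' : PySem.List.sorted (powers.filter (fun x => decide (x < 0))) (fun x => x) true = negs := rfl
  rw [hposs', hnegs']
  set lo := k - negs.length with hlo
  set hi := min k poss.length with hhi
  have hlohi : lo ≤ hi := by omega
  -- rewrite B's table lookups into A's recurrences, for indices inside the scan range
  have hcell : ∀ x : Nat, lo ≤ x → x ≤ hi →
      (max 1 (max ((altNeed (fun v => v + 1) poss 1 0).getD x 0)
        ((altNeed (fun v => 1 - v) negs 1 0).getD (k - x) 0 - (altPrefix poss 0).getD x 0)))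
      = pvCost poss negs k x := by
    intro x hxlo hxhi
    have hx1 : x ≤ poss.length := by omega
    have hx2 : k - x ≤ negs.length := by omega
    rw [altNeed_getD _ _ _ _ _ hx1, altNeed_getD _ _ _ _ _ hx2, altPrefix_getD _ _ _ hx1,
      ← needPos_eq_gNeed, ← needNeg_eq_gNeed]
    unfold pvCost
    ring_nf
  -- B's sweep with the cost rewritten, then turned into foldl min over the mapped range
  have hfold :
      (List.range' (lo + 1) (hi - lo)).foldl
        (fun best x =>
          let c := max 1 (max ((altNeed (fun v => v + 1) poss 1 0).getD x 0)
            ((altNeed (fun v => 1 - v) negs 1 0).getD (k - x) 0 - (altPrefix poss 0).getD x 0))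
          if c < best then c else best)
        (max 1 (max ((altNeed (fun v => v + 1) poss 1 0).getD lo 0)
          ((altNeed (fun v => 1 - v) negs 1 0).getD (k - lo) 0 - (altPrefix poss 0).getD lo 0)))
      = ((List.range' (lo + 1) (hi - lo)).map (pvCost poss negs k)).foldl min (pvCost poss negs k lo) := by
    rw [hcell lo le_rfl hlohi, List.foldl_map]
    apply PySem.List.foldl_congr_mem
    intro acc x hx
    rw [List.mem_range'_1] at hx
    rw [hcell x (by omega) (by omega)]
    rcases lt_or_ge (pvCost poss negs k x) acc with h | h
    · simp [h, min_eq_right (le_of_lt h)]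
    · simp [not_lt.mpr h, min_eq_left h]
  rw [hfold, perk_eq poss negs hpos k lo hi hlohi]
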